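-- pv_equiv track=rewrite | github.com/ChanchalKumarMaji/CodeForces | 1333B.py | solve
-- ===== SOURCE A (Python) =====
-- def solve(a, b):
--     n = len(a)
--     s = set()
--     res = True
--     for i in range(1, n):
--         s.add(a[i-1])
--         offset = b[i] - a[i]
--         res &= (offset == 0) | (offset > 0 and (1 in s)) | (offset < 0 and (-1 in s))
--     if res and a[0] == b[0]:
--         return "YES"
--     return "NO"
-- ===== SOURCE B (Python) =====
-- def solve(a, b):
--     if a[0] != b[0]:
--         return "NO"
--     n = len(a)
--     first_inc = min((i for i in range(1, n) if b[i] > a[i]), default=n)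
--     first_dec = min((i for i in range(1, n) if b[i] < a[i]), default=n)
--     first_one = min((j for j in range(n) if a[j] == 1), default=n)
--     first_minus = min((j for j in range(n) if a[j] == -1), default=n)
--     inc_ok = first_inc == n or first_one < first_inc
--     dec_ok = first_dec == n or first_minus < first_dec
--     return "YES" if inc_ok and dec_ok else "NO"
-- ===== Notes on version B (the rewrite author's own statement) =====
-- stated objective: alternative
-- what changed: Replaces A's single accumulating pass (running prefix set, per-index feasibility conjunction) by a reduction: compute the minimum index needing an increase and the one needing a decrease (min over filtered ranges, default n) plus the first occurrences of 1 and -1 in a, and decide the answer by two index comparisons (first_one < first_inc, first_minus < first_dec).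
import Mathlib
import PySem

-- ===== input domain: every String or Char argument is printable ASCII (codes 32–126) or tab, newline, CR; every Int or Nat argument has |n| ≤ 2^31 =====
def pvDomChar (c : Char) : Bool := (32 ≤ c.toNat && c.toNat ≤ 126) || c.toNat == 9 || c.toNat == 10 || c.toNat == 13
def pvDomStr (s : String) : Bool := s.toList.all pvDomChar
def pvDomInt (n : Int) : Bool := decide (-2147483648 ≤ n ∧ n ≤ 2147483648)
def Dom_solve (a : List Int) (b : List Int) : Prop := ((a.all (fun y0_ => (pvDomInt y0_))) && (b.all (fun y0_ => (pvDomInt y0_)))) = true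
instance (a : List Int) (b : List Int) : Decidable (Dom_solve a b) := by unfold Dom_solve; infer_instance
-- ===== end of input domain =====

-- B replaces A's accumulating per-index pass by a reduction to four minimum indices
-- (first increase / decrease needed, first 1 / -1 in a) compared in O(1) (objective: alternative).

-- ===== PORT A =====
-- loop body of A: add a[i-1] to the set, then res &= (offset==0)|(offset>0 and 1 in s)|(offset<0 and -1 in s)
def stepA (a : List Int) (b : List Int) (st : PySem.Set Int × Bool) (i : Int) : PySem.Set Int × Bool :=
  let s := PySem.Set.add st.1 (PySem.List.pyGetD a (i-1) 0)
  let offset := PySem.List.pyGetD b i 0 - PySem.List.pyGetD a i 0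
  (s, st.2 && (decide (offset = 0) || (decide (offset > 0) && PySem.Set.contains s 1) ||
               (decide (offset < 0) && PySem.Set.contains s (-1))))

def solve (a : List Int) (b : List Int) : String :=
  let n : Int := (a.length : Int)
  let r := (PySem.List.pyRange 1 n 1).foldl (stepA a b) (PySem.Set.empty, true)
  if r.2 && decide (PySem.List.pyGetD a 0 0 = PySem.List.pyGetD b 0 0) then "YES" else "NO"

-- ===== PORT B =====
-- min((x for x in l if p x), default=n)
def minIdxD (l : List Int) (p : Int → Bool) (n : Int) : Int :=
  (PySem.List.min? (l.filter p) (fun x => x)).getD n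

def solve_alt (a : List Int) (b : List Int) : String :=
  if PySem.List.pyGetD a 0 0 ≠ PySem.List.pyGetD b 0 0 then "NO"
  else
    let n : Int := (a.length : Int)
    let firstInc := minIdxD (PySem.List.pyRange 1 n 1)
      (fun i => decide (PySem.List.pyGetD a i 0 < PySem.List.pyGetD b i 0)) n
    let firstDec := minIdxD (PySem.List.pyRange 1 n 1)
      (fun i => decide (PySem.List.pyGetD b i 0 < PySem.List.pyGetD a i 0)) n
    let firstOne := minIdxD (PySem.List.pyRange 0 n 1)
      (fun j => decide (PySem.List.pyGetD a j 0 = 1)) n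
    let firstMinus := minIdxD (PySem.List.pyRange 0 n 1)
      (fun j => decide (PySem.List.pyGetD a j 0 = -1)) n
    let incOk := decide (firstInc = n) || decide (firstOne < firstInc)
    let decOk := decide (firstDec = n) || decide (firstMinus < firstDec)
    if incOk && decOk then "YES" else "NO"

-- ===== PRECONDITION & SPEC =====
-- A raises IndexError on a = [] (at a[0]) and whenever b is shorter than a (at b[i]); exactly those are excluded.
def Pre_solve (a : List Int) (b : List Int) : Prop := a ≠ [] ∧ a.length ≤ b.length
instance (a : List Int) (b : List Int) : Decidable (Pre_solve a b) := by unfold Pre_solve; infer_instance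
def pvWitness_solve : List Int × List Int := ([1, 2], [1, 3])

def Spec_solve (a : List Int) (b : List Int) (out : String) : Prop := out = solve_alt a b
instance (a : List Int) (b : List Int) (out : String) : Decidable (Spec_solve a b out) := by unfold Spec_solve; infer_instance

-- ===== CLAIM (what is proved, stated in full; the proofs are below) =====
def Claim_equal_solve : Prop := ∀ (a : List Int) (b : List Int), Dom_solve a b → Pre_solve a b → Spec_solve a b (solve a b)

-- ===== LEMMAS AND PROOFS =====

-- the condition A's loop effectively checks at index i (membership in the length-i prefix of a)
def condC (a : List Int) (b : List Int) (i : Int) : Bool :=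
  let offset := PySem.List.pyGetD b i 0 - PySem.List.pyGetD a i 0
  decide (offset = 0) || (decide (offset > 0) && decide ((1 : Int) ∈ a.take i.toNat)) ||
  (decide (offset < 0) && decide ((-1 : Int) ∈ a.take i.toNat))

theorem foldA_inv (a b : List Int) : ∀ (k : Nat), k ≤ a.length →
    (∀ v : Int, v ∈ ((PySem.List.pyRange 1 (k : Int) 1).foldl (stepA a b) (PySem.Set.empty, true)).1 ↔
       v ∈ a.take (k - 1)) ∧
    ((PySem.List.pyRange 1 (k : Int) 1).foldl (stepA a b) (PySem.Set.empty, true)).2 =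
      (PySem.List.pyRange 1 (k : Int) 1).all (condC a b) := by
  intro k
  induction k with
  | zero =>
    intro _
    rw [PySem.List.pyRange_one_eq_nil (by omega)]
    constructor
    · intro v; simp [PySem.Set.empty]
    · rfl
  | succ k ih =>
    intro hk
    by_cases hk0 : k = 0
    · subst hk0
      rw [show ((0 + 1 : Nat) : Int) = 1 by norm_num, PySem.List.pyRange_one_eq_nil (by omega)]
      constructor
      · intro v; simp [PySem.Set.empty]
      · rfl
    · have hk1 : 1 ≤ k := Nat.one_le_iff_ne_zero.mpr hk0
      have hrange : PySem.List.pyRange 1 ((k + 1 : Nat) : Int) 1 =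
          PySem.List.pyRange 1 (k : Int) 1 ++ [(k : Int)] := by
        push_cast
        exact PySem.List.pyRange_one_succ_right (by omega)
      obtain ⟨ihs, ihr⟩ := ih (by omega)
      rw [hrange, List.foldl_append, List.all_append]
      have hidx : (k : Int) - 1 = ((k - 1 : Nat) : Int) := by push_cast [hk1]; ring
      have hk1len : k - 1 < a.length := by omega
      have hget : PySem.List.pyGetD a ((k : Int) - 1) 0 = a[k - 1] := by
        rw [hidx, PySem.List.pyGetD_natCast]
        exact List.getD_eq_getElem a 0 hk1len
      have htake : a.take k = a.take (k - 1) ++ [a[k - 1]] := by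
        conv_lhs => rw [show k = (k - 1) + 1 by omega]
        rw [List.take_add_one, List.getElem?_eq_getElem hk1len]
        rfl
      have hsplit : ∀ v : Int, v ∈ a.take k ↔ v ∈ a.take (k - 1) ∨ v = a[k - 1] := by
        intro v; rw [htake, List.mem_append, List.mem_singleton]
      have hmem : ∀ v : Int,
          v ∈ PySem.Set.add ((PySem.List.pyRange 1 (k : Int) 1).foldl (stepA a b) (PySem.Set.empty, true)).1
              (PySem.List.pyGetD a ((k : Int) - 1) 0) ↔ v ∈ a.take k := by
        intro v
        rw [PySem.Set.mem_add, ihs, hget, hsplit]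
      have hc1 : PySem.Set.contains (PySem.Set.add ((PySem.List.pyRange 1 (k : Int) 1).foldl (stepA a b) (PySem.Set.empty, true)).1
              (PySem.List.pyGetD a ((k : Int) - 1) 0)) 1 = decide ((1 : Int) ∈ a.take k) := by
        rw [Bool.eq_iff_iff, PySem.Set.contains_iff, decide_eq_true_iff]
        exact hmem 1
      have hcn : PySem.Set.contains (PySem.Set.add ((PySem.List.pyRange 1 (k : Int) 1).foldl (stepA a b) (PySem.Set.empty, true)).1
              (PySem.List.pyGetD a ((k : Int) - 1) 0)) (-1) = decide ((-1 : Int) ∈ a.take k) := by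
        rw [Bool.eq_iff_iff, PySem.Set.contains_iff, decide_eq_true_iff]
        exact hmem (-1)
      constructor
      · intro v
        have h2 : (k + 1) - 1 = k := by omega
        rw [List.foldl_cons, List.foldl_nil, h2]
        simp only [stepA]
        exact hmem v
      · rw [List.foldl_cons, List.foldl_nil, List.all_cons, List.all_nil, Bool.and_true]
        have hstep2 : (stepA a b ((PySem.List.pyRange 1 (k : Int) 1).foldl (stepA a b) (PySem.Set.empty, true)) (k : Int)).2
            = (((PySem.List.pyRange 1 (k : Int) 1).foldl (stepA a b) (PySem.Set.empty, true)).2 && condC a b (k : Int)) := by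
          simp only [stepA]
          rw [hc1, hcn]
          simp only [condC, Int.toNat_natCast]
          rfl
        rw [hstep2, ihr]

-- min(filter, default=n) < c, provided c ≤ n
theorem minIdxD_lt_iff (l : List Int) (p : Int → Bool) (n c : Int) (hc : c ≤ n) :
    minIdxD l p n < c ↔ ∃ x ∈ l, p x = true ∧ x < c := by
  unfold minIdxD
  cases h : PySem.List.min? (l.filter p) (fun x => x) with
  | none =>
    rw [PySem.List.min?_eq_none_iff] at h
    simp only [Option.getD_none]
    constructor
    · intro hnc; omega
    · rintro ⟨x, hx, hp, -⟩
      have : x ∈ l.filter p := List.mem_filter.mpr ⟨hx, hp⟩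
      rw [h] at this; cases this
  | some m =>
    have hm := PySem.List.min?_mem h
    have hmin := PySem.List.min?_isMin h
    obtain ⟨hml, hmp⟩ := List.mem_filter.mp hm
    simp only [Option.getD_some]
    constructor
    · intro hlt; exact ⟨m, hml, hmp, hlt⟩
    · rintro ⟨x, hx, hp, hxc⟩
      have := hmin x (List.mem_filter.mpr ⟨hx, hp⟩)
      omega

-- (min = n or c < min) says exactly: every selected element exceeds c (elements of l are < n)
theorem minIdxD_all_iff (l : List Int) (p : Int → Bool) (n c : Int) (hub : ∀ x ∈ l, x < n) :
    (minIdxD l p n = n ∨ c < minIdxD l p n) ↔ ∀ x ∈ l, p x = true → c < x := by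
  unfold minIdxD
  cases h : PySem.List.min? (l.filter p) (fun x => x) with
  | none =>
    rw [PySem.List.min?_eq_none_iff] at h
    simp only [Option.getD_none]
    constructor
    · intro _ x hx hp
      have : x ∈ l.filter p := List.mem_filter.mpr ⟨hx, hp⟩
      rw [h] at this; cases this
    · intro _; exact Or.inl (by simp)
  | some m =>
    have hm := PySem.List.min?_mem h
    have hmin := PySem.List.min?_isMin h
    obtain ⟨hml, hmp⟩ := List.mem_filter.mp hm
    have hmn : m < n := hub m hml
    simp only [Option.getD_some]
    constructor
    · rintro (rfl | hcm) x hx hp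
      · omega
      · have := hmin x (List.mem_filter.mpr ⟨hx, hp⟩); omega
    · intro hall; exact Or.inr (hall m hml hmp)

-- prefix membership expressed through the first-occurrence minimum
theorem mem_take_iff_first (a : List Int) (v i : Int) (hi0 : 0 < i) (hin : i ≤ (a.length : Int)) :
    v ∈ a.take i.toNat ↔
      minIdxD (PySem.List.pyRange 0 (a.length : Int) 1)
        (fun j => decide (PySem.List.pyGetD a j 0 = v)) (a.length : Int) < i := by
  rw [minIdxD_lt_iff _ _ _ _ hin]
  constructor
  · intro hv
    obtain ⟨k, hk, hget⟩ := List.mem_iff_getElem.mp hv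
    have hklen : k < a.length := by
      have := hk; rw [List.length_take] at this; omega
    have hki : (k : Int) < i := by
      have := hk; rw [List.length_take] at this
      have hk2 : k < i.toNat := by omega
      omega
    refine ⟨(k : Int), ?_, ?_, hki⟩
    · rw [PySem.List.mem_pyRange_one]; constructor <;> omega
    · rw [decide_eq_true_iff, PySem.List.pyGetD_natCast, List.getD_eq_getElem a 0 hklen]
      rw [List.getElem_take] at hget
      exact hget
  · rintro ⟨j, hjr, hjp, hji⟩
    rw [PySem.List.mem_pyRange_one] at hjr
    rw [decide_eq_true_iff] at hjp
    have hjlen : j.toNat < a.length := by omega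
    have hval : a[j.toNat] = v := by
      have h2 : PySem.List.pyGetD a j 0 = a.getD j.toNat 0 := by
        rw [show j = ((j.toNat : Nat) : Int) by omega, PySem.List.pyGetD_natCast]
        rw [Int.toNat_natCast]
      rw [h2, List.getD_eq_getElem a 0 hjlen] at hjp
      exact hjp
    apply List.mem_iff_getElem.mpr
    refine ⟨j.toNat, ?_, ?_⟩
    · rw [List.length_take]; omega
    · rw [List.getElem_take]; exact hval

-- A's per-index condition, rewritten through the four minimum indices
theorem condC_iff (a b : List Int) (i : Int) (h1 : 1 ≤ i) (h2 : i < (a.length : Int)) :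
    (condC a b i = true) ↔
      ((PySem.List.pyGetD a i 0 < PySem.List.pyGetD b i 0 →
          minIdxD (PySem.List.pyRange 0 (a.length : Int) 1)
            (fun j => decide (PySem.List.pyGetD a j 0 = 1)) (a.length : Int) < i) ∧
       (PySem.List.pyGetD b i 0 < PySem.List.pyGetD a i 0 →
          minIdxD (PySem.List.pyRange 0 (a.length : Int) 1)
            (fun j => decide (PySem.List.pyGetD a j 0 = -1)) (a.length : Int) < i)) := by
  simp only [condC, Bool.or_eq_true, Bool.and_eq_true, decide_eq_true_iff]
  rw [mem_take_iff_first a 1 i (by omega) (by omega),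
      mem_take_iff_first a (-1) i (by omega) (by omega)]
  omega

-- ===== VERDICT (by name: the statement is the Claim_ definition above) =====
theorem solve_spec : Claim_equal_solve := by
  unfold Claim_equal_solve
  intro a b _ hpre
  simp only [Spec_solve, solve, solve_alt]
  obtain ⟨-, hres⟩ := foldA_inv a b a.length le_rfl
  rw [hres]
  by_cases h0 : PySem.List.pyGetD a 0 0 = PySem.List.pyGetD b 0 0
  · rw [decide_eq_true h0, Bool.and_true]
    have hub : ∀ x ∈ PySem.List.pyRange 1 (a.length : Int) 1, x < (a.length : Int) := by
      intro x hx; exact (PySem.List.mem_pyRange_one.mp hx).2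
    have hbool :
        (PySem.List.pyRange 1 (a.length : Int) 1).all (condC a b) =
        ((decide (minIdxD (PySem.List.pyRange 1 (a.length : Int) 1)
              (fun i => decide (PySem.List.pyGetD a i 0 < PySem.List.pyGetD b i 0)) (a.length : Int) = (a.length : Int)) ||
          decide (minIdxD (PySem.List.pyRange 0 (a.length : Int) 1)
              (fun j => decide (PySem.List.pyGetD a j 0 = 1)) (a.length : Int) <
            minIdxD (PySem.List.pyRange 1 (a.length : Int) 1)
              (fun i => decide (PySem.List.pyGetD a i 0 < PySem.List.pyGetD b i 0)) (a.length : Int))) &&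
         (decide (minIdxD (PySem.List.pyRange 1 (a.length : Int) 1)
              (fun i => decide (PySem.List.pyGetD b i 0 < PySem.List.pyGetD a i 0)) (a.length : Int) = (a.length : Int)) ||
          decide (minIdxD (PySem.List.pyRange 0 (a.length : Int) 1)
              (fun j => decide (PySem.List.pyGetD a j 0 = -1)) (a.length : Int) <
            minIdxD (PySem.List.pyRange 1 (a.length : Int) 1)
              (fun i => decide (PySem.List.pyGetD b i 0 < PySem.List.pyGetD a i 0)) (a.length : Int)))) := by
      rw [Bool.eq_iff_iff, List.all_eq_true]
      rw [Bool.and_eq_true, Bool.or_eq_true, Bool.or_eq_true]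
      simp only [decide_eq_true_iff]
      rw [minIdxD_all_iff _ _ _ _ hub, minIdxD_all_iff _ _ _ _ hub]
      have hpt : ∀ i ∈ PySem.List.pyRange 1 (a.length : Int) 1, (condC a b i = true) ↔
          ((PySem.List.pyGetD a i 0 < PySem.List.pyGetD b i 0 →
              minIdxD (PySem.List.pyRange 0 (a.length : Int) 1)
                (fun j => decide (PySem.List.pyGetD a j 0 = 1)) (a.length : Int) < i) ∧
           (PySem.List.pyGetD b i 0 < PySem.List.pyGetD a i 0 →
              minIdxD (PySem.List.pyRange 0 (a.length : Int) 1)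
                (fun j => decide (PySem.List.pyGetD a j 0 = -1)) (a.length : Int) < i)) := by
        intro i hi
        obtain ⟨hi1, hi2⟩ := PySem.List.mem_pyRange_one.mp hi
        exact condC_iff a b i hi1 hi2
      constructor
      · intro h
        refine ⟨?_, ?_⟩
        · intro x hx hp
          have := ((hpt x hx).mp (h x hx)).1
          simpa using this (by simpa using hp)
        · intro x hx hp
          have := ((hpt x hx).mp (h x hx)).2
          simpa using this (by simpa using hp)
      · rintro ⟨hA, hB⟩ i hi
        refine (hpt i hi).mpr ⟨?_, ?_⟩
        · intro hlt; exact hA i hi (by simpa using hlt)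
        · intro hlt; exact hB i hi (by simpa using hlt)
    rw [hbool]
    simp [h0]
  · simp [h0]
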